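-- pv_equiv track=rewrite | github.com/Soyeonjeong94/pdf_to_questions | Desktop/python_project/pdf_to_questions/pdf_to_questions_github/pdf_to_questions_v260423.py | group_run_info
-- ===== SOURCE A (Python) =====
-- def detect_runs(positions):
--     """
--     페이지 순서 positions에서 연속 증가 시퀀스(런)를 감지.
--     번호가 이전보다 작아질 때 새 런(=새 단원)으로 분리.
--     반환: list of position-lists (각 런별 positions)
--     """
--     if not positions:
--         return []
--     runs, current = [], [positions[0]]
--     for pos in positions[1:]:
--         if pos[0] > current[-1][0]:
--             current.append(pos)
--         else:
--             runs.append(current)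
--             current = [pos]
--     runs.append(current)
--     return runs
--
-- def group_run_info(positions):
--     """
--     그룹의 런 분석 정보 반환.
--     반환: (runs, overall_max, label_text)
--       - overall_max : 모든 런 중 가장 큰 문제 번호
--       - label_text  : "1~23, 1~20  (총 2단원 / 43문제)" 형식
--     """
--     runs = detect_runs(positions)
--     if not runs:
--         return [], 0, ""
--     run_maxes = [max(p[0] for p in r) for r in runs]
--     overall_max = max(run_maxes)
--     if len(runs) == 1:
--         label = f"1~{run_maxes[0]}  ({len(positions)}문제)"
--     else:
--         parts = [f"1~{m}" for m in run_maxes[:4]]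
--         if len(runs) > 4:
--             parts.append(f"... 외 {len(runs) - 4}단원")
--         label = ", ".join(parts) + f"  (총 {len(runs)}단원 / {len(positions)}문제)"
--     return runs, overall_max, label
-- ===== SOURCE B (Python) =====
-- def group_run_info(positions):
--     # Slice-off decomposition: repeatedly measure the maximal strictly-increasing
--     # prefix of the remainder and cut it off; no detect_runs helper, no per-run
--     # max() rescans (a run's max is its last element since runs strictly increase).
--     runs = []
--     rest = positions
--     while rest:
--         i = 1
--         while i < len(rest) and rest[i][0] > rest[i - 1][0]:
--             i += 1
--         runs.append(rest[:i])
--         rest = rest[i:]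
--     if not runs:
--         return [], 0, ""
--     run_maxes = [r[-1][0] for r in runs]
--     overall_max = max(run_maxes)
--     n, k = len(positions), len(runs)
--     if k == 1:
--         return runs, overall_max, f"1~{run_maxes[0]}  ({n}문제)"
--     head = ", ".join(f"1~{m}" for m in run_maxes[:4])
--     extra = f", ... 외 {k - 4}단원" if k > 4 else ""
--     return runs, overall_max, head + extra + f"  (총 {k}단원 / {n}문제)"
-- ===== Notes on version B (the rewrite author's own statement) =====
-- stated objective: alternative
-- what changed: B removes the detect_runs helper and the per-run max() rescans: it repeatedly slices the maximal strictly-increasing prefix off the front of the remaining list (a scan-then-cut loop instead of an element-by-element accumulator), reads each run's max as its last element, and assembles the multi-run label as join(head)+extra+tail instead of appending a suffix part before joining.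
import Mathlib
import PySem

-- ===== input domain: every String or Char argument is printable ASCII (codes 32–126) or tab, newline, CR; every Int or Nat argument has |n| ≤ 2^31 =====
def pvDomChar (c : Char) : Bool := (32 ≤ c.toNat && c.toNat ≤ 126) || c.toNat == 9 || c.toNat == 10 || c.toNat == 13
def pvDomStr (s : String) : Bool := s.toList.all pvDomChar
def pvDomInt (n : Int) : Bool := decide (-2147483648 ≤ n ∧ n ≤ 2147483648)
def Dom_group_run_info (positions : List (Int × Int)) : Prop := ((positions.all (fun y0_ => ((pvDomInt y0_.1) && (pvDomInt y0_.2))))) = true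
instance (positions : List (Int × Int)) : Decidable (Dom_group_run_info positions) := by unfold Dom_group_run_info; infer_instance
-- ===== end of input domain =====

-- B drops the detect_runs helper and instead slices maximal strictly-increasing prefixes
-- off the front of the remaining list, reading each run's max as its last element instead
-- of rescanning with max(); same return value (alternative decomposition, no speed claim).

-- ===== PORT A =====
-- detect_runs: loop over positions[1:] with state (runs, current); current is never
-- empty, so current[-1] is ported as getLast? with an unreachable default.
def detect_runs (positions : List (Int × Int)) : List (List (Int × Int)) :=
  match positions with
  | [] => []
  | p0 :: rest =>
    let st := rest.foldl
      (fun (st : List (List (Int × Int)) × List (Int × Int)) pos =>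
        if pos.1 > ((st.2.getLast?).getD (0, 0)).1 then (st.1, st.2 ++ [pos])
        else (st.1 ++ [st.2], [pos]))
      ([], [p0])
    st.1 ++ [st.2]

def group_run_info (positions : List (Int × Int)) : (List (List (Int × Int))) × Int × String :=
  let runs := detect_runs positions
  if runs = [] then ([], 0, "") else
  -- max(p[0] for p in r): runs entries are nonempty, the .getD 0 default is unreachable
  let run_maxes := runs.map (fun r => (PySem.List.max? (r.map Prod.fst) (fun x => x)).getD 0)
  let overall_max := (PySem.List.max? run_maxes (fun x => x)).getD 0
  let label :=
    if runs.length = 1 then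
      "1~" ++ PySem.Int.toStr (run_maxes.headD 0) ++ "  (" ++ PySem.Int.toStr (positions.length : Int) ++ "문제)"
    else
      let parts := (PySem.List.slice run_maxes none (some 4)).map (fun m => "1~" ++ PySem.Int.toStr m)
      let parts := if runs.length > 4 then parts ++ ["... 외 " ++ PySem.Int.toStr ((runs.length : Int) - 4) ++ "단원"] else parts
      PySem.Str.join ", " parts ++ "  (총 " ++ PySem.Int.toStr (runs.length : Int) ++ "단원 / " ++ PySem.Int.toStr (positions.length : Int) ++ "문제)"
  (runs, overall_max, label)

-- ===== PORT B =====
-- the inner 'while i < len(rest) and rest[i][0] > rest[i-1][0]: i += 1' scan of Source B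
-- (i starts at 1; compares consecutive elements)
def incLen : List (Int × Int) → Nat
  | p :: q :: t => if q.1 > p.1 then incLen (q :: t) + 1 else 1
  | _ => 1

theorem incLen_pos (l : List (Int × Int)) : 0 < incLen l := by
  match l with
  | [] => simp [incLen]
  | [_] => simp [incLen]
  | p :: q :: t => rw [incLen]; split <;> omega

-- the outer 'while rest:' loop of Source B: cut rest[:i] off, recurse on rest[i:]
def splitRuns (l : List (Int × Int)) : List (List (Int × Int)) :=
  match l with
  | [] => []
  | p :: t =>
    let i := incLen (p :: t)
    (p :: t).take i :: splitRuns ((p :: t).drop i)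
termination_by l.length
decreasing_by simp; have := incLen_pos (p :: t); omega

def group_run_info_alt (positions : List (Int × Int)) : (List (List (Int × Int))) × Int × String :=
  let runs := splitRuns positions
  if runs = [] then ([], 0, "") else
  -- r[-1][0]: last element of the (nonempty) run
  let run_maxes := runs.map (fun r => ((PySem.List.pyGet? r (-1)).getD (0, 0)).1)
  let overall_max := (PySem.List.max? run_maxes (fun x => x)).getD 0
  let n : Int := (positions.length : Int)
  let k := runs.length
  if k = 1 then
    (runs, overall_max, "1~" ++ PySem.Int.toStr ((PySem.List.pyGet? run_maxes 0).getD 0) ++ "  (" ++ PySem.Int.toStr n ++ "문제)")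
  else
    let head := PySem.Str.join ", " ((run_maxes.take 4).map (fun m => "1~" ++ PySem.Int.toStr m))
    let extra := if k > 4 then ", ... 외 " ++ PySem.Int.toStr ((k : Int) - 4) ++ "단원" else ""
    (runs, overall_max, head ++ extra ++ ("  (총 " ++ PySem.Int.toStr (k : Int) ++ "단원 / " ++ PySem.Int.toStr n ++ "문제)"))

-- ===== PRECONDITION & SPEC =====
def Spec_group_run_info (positions : List (Int × Int)) (out : (List (List (Int × Int))) × Int × String) : Prop := out = group_run_info_alt positions
instance (positions : List (Int × Int)) (out : (List (List (Int × Int))) × Int × String) : Decidable (Spec_group_run_info positions out) := by unfold Spec_group_run_info; infer_instance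

-- ===== CLAIM (what is proved, stated in full; the proofs are below) =====
def Claim_equal_group_run_info : Prop := ∀ (positions : List (Int × Int)), Dom_group_run_info positions → Spec_group_run_info positions (group_run_info positions)

-- ===== LEMMAS AND PROOFS =====

-- length of the strictly-increasing extension of a run whose last first-component is x
def extLen (x : Int) : List (Int × Int) → Nat
  | [] => 0
  | p :: t => if p.1 > x then extLen p.1 t + 1 else 0

lemma incLen_cons (p : Int × Int) (l : List (Int × Int)) :
    incLen (p :: l) = extLen p.1 l + 1 := by
  induction l generalizing p with
  | nil => simp [incLen, extLen]
  | cons q t ih => rw [incLen, extLen, ih]; split <;> rfl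

lemma splitRuns_cons (p : Int × Int) (t : List (Int × Int)) :
    splitRuns (p :: t) = (p :: t.take (extLen p.1 t)) :: splitRuns (t.drop (extLen p.1 t)) := by
  rw [splitRuns, incLen_cons]
  simp

-- A-side loop characterisation
def runsFrom (cur : List (Int × Int)) : List (Int × Int) → List (List (Int × Int))
  | [] => [cur]
  | p :: l => if p.1 > ((cur.getLast?).getD (0, 0)).1 then runsFrom (cur ++ [p]) l
              else cur :: runsFrom [p] l

lemma runsFrom_spec (l : List (Int × Int)) :
    ∀ (cur : List (Int × Int)) (q : Int × Int),
      runsFrom (cur ++ [q]) l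
        = (cur ++ q :: l.take (extLen q.1 l)) :: splitRuns (l.drop (extLen q.1 l)) := by
  induction l with
  | nil => intro cur q; simp [runsFrom, extLen, splitRuns]
  | cons p t ih =>
    intro cur q
    have hgl : (((cur ++ [q]).getLast?).getD (0, 0)) = q := by simp
    rw [runsFrom, hgl]
    by_cases hc : p.1 > q.1
    · rw [if_pos hc, ih (cur ++ [q]) p, extLen, if_pos hc]
      simp
    · rw [if_neg hc, extLen, if_neg hc]
      have h1 := ih [] p
      simp only [List.nil_append] at h1
      rw [h1, ← splitRuns_cons]
      simp

lemma foldl_detect (l : List (Int × Int)) :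
    ∀ (runs : List (List (Int × Int))) (cur : List (Int × Int)),
      (let st := l.foldl
        (fun (st : List (List (Int × Int)) × List (Int × Int)) pos =>
          if pos.1 > ((st.2.getLast?).getD (0, 0)).1 then (st.1, st.2 ++ [pos])
          else (st.1 ++ [st.2], [pos])) (runs, cur)
       st.1 ++ [st.2]) = runs ++ runsFrom cur l := by
  induction l with
  | nil => intro runs cur; simp [runsFrom]
  | cons p l ih =>
    intro runs cur
    rw [List.foldl_cons]
    by_cases hc : p.1 > ((cur.getLast?).getD (0, 0)).1
    · simpa [hc, runsFrom] using ih runs (cur ++ [p])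
    · simp only [hc, if_false]
      rw [runsFrom, if_neg hc]
      simpa using ih (runs ++ [cur]) [p]

lemma detect_runs_eq_splitRuns (l : List (Int × Int)) : detect_runs l = splitRuns l := by
  cases l with
  | nil => simp [detect_runs, splitRuns]
  | cons p rest =>
    have h := foldl_detect rest [] [p]
    simp only [List.nil_append] at h
    show ((rest.foldl
        (fun (st : List (List (Int × Int)) × List (Int × Int)) pos =>
          if pos.1 > ((st.2.getLast?).getD (0, 0)).1 then (st.1, st.2 ++ [pos])
          else (st.1 ++ [st.2], [pos])) ([], [p])).1 ++
      [(rest.foldl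
        (fun (st : List (List (Int × Int)) × List (Int × Int)) pos =>
          if pos.1 > ((st.2.getLast?).getD (0, 0)).1 then (st.1, st.2 ++ [pos])
          else (st.1 ++ [st.2], [pos])) ([], [p])).2]) = splitRuns (p :: rest)
    rw [h, show ([p] : List (Int × Int)) = [] ++ [p] by rfl, runsFrom_spec]
    simp only [List.nil_append]
    rw [← splitRuns_cons]

-- every run produced by splitRuns is nonempty and strictly increasing in fst
lemma take_extLen_chain (t : List (Int × Int)) :
    ∀ p : Int × Int, (p :: t.take (extLen p.1 t)).IsChain (fun a b => a.1 < b.1) := by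
  induction t with
  | nil => intro p; simp [extLen]
  | cons q t ih =>
    intro p
    rw [extLen]
    by_cases hc : q.1 > p.1
    · rw [if_pos hc]
      simp only [List.take_succ_cons]
      exact List.isChain_cons_cons.mpr ⟨hc, ih q⟩
    · rw [if_neg hc]; simp

lemma splitRuns_mem_chain {l : List (Int × Int)} {r : List (Int × Int)} (h : r ∈ splitRuns l) :
    r ≠ [] ∧ r.IsChain (fun a b => a.1 < b.1) := by
  induction hn : l.length using Nat.strong_induction_on generalizing l r with
  | _ n ih =>
    cases l with
    | nil => simp [splitRuns] at h
    | cons p t =>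
      rw [splitRuns_cons] at h
      rcases List.mem_cons.mp h with h1 | h1
      · subst h1
        exact ⟨by simp, take_extLen_chain t p⟩
      · have hlen : (t.drop (extLen p.1 t)).length < n := by
          subst hn; simp only [List.length_drop, List.length_cons]; omega
        exact ih _ hlen h1 rfl

lemma foldl_max_chain (t : List (Int × Int)) :
    ∀ a : Int × Int, (a :: t).IsChain (fun x y => x.1 < y.1) →
      (t.map Prod.fst).foldl max a.1 = ((a :: t).getLast (by simp)).1 := by
  induction t with
  | nil => intro a _; simp
  | cons b t ih =>
    intro a hch
    rw [List.isChain_cons_cons] at hch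
    have : max a.1 b.1 = b.1 := max_eq_right (le_of_lt hch.1)
    simp only [List.map_cons, List.foldl_cons, this, ih b hch.2]
    simp [List.getLast]

lemma max_eq_last {r : List (Int × Int)} (hne : r ≠ []) (hc : r.IsChain (fun a b => a.1 < b.1)) :
    (PySem.List.max? (r.map Prod.fst) (fun x => x)).getD 0 = ((PySem.List.pyGet? r (-1)).getD (0, 0)).1 := by
  cases r with
  | nil => exact absurd rfl hne
  | cons a t =>
    rw [PySem.List.pyGet?_neg_one]
    simp only [List.map_cons, PySem.List.max?_id_cons, Option.getD_some]
    rw [foldl_max_chain t a hc]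
    simp [List.getLast?_eq_some_getLast]

-- join over an appended singleton, for a nonempty prefix
lemma chars_join_append_singleton (sep x : List Char) :
    ∀ l : List (List Char), l ≠ [] →
      PySem.Chars.join sep (l ++ [x]) = PySem.Chars.join sep l ++ sep ++ x := by
  intro l
  induction l with
  | nil => intro h; exact absurd rfl h
  | cons a t ih =>
    intro _
    cases t with
    | nil => simp [PySem.Chars.join_cons_cons, PySem.Chars.join_singleton]
    | cons b t2 =>
      rw [show (a :: b :: t2) ++ [x] = a :: b :: (t2 ++ [x]) from rfl,
          PySem.Chars.join_cons_cons sep a b (t2 ++ [x]),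
          show b :: (t2 ++ [x]) = (b :: t2) ++ [x] from rfl,
          ih (by simp), PySem.Chars.join_cons_cons sep a b t2]
      simp

lemma headD_eq_pyGet (l : List Int) : l.headD 0 = (PySem.List.pyGet? l 0).getD 0 := by
  cases l <;> simp [PySem.List.pyGet?_zero]

-- ===== VERDICT (by name: the statement is the Claim_ definition above) =====
theorem group_run_info_spec : Claim_equal_group_run_info := by
  intro positions _
  unfold Spec_group_run_info group_run_info group_run_info_alt
  rw [detect_runs_eq_splitRuns]
  by_cases hnil : splitRuns positions = []
  · simp [hnil]
  · simp only [if_neg hnil]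
    have hm : (splitRuns positions).map (fun r => (PySem.List.max? (r.map Prod.fst) (fun x => x)).getD 0)
        = (splitRuns positions).map (fun r => ((PySem.List.pyGet? r (-1)).getD (0, 0)).1) := by
      apply List.map_congr_left
      intro r hr
      obtain ⟨hne, hc⟩ := splitRuns_mem_chain hr
      exact max_eq_last hne hc
    rw [hm]
    set runs := splitRuns positions with hruns
    set rm := runs.map (fun r => ((PySem.List.pyGet? r (-1)).getD (0, 0)).1) with hrm
    have hrmne : rm ≠ [] := by
      simpa [hrm] using hnil
    by_cases h1 : runs.length = 1
    · simp only [if_pos h1]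
      refine Prod.ext rfl (Prod.ext rfl ?_)
      rw [headD_eq_pyGet]
    · simp only [if_neg h1]
      refine Prod.ext rfl (Prod.ext rfl ?_)
      rw [PySem.List.slice_to rm (by omega : (0:Int) ≤ 4)]
      have h4 : ((4:Int)).toNat = 4 := rfl
      rw [h4]
      by_cases hgt : runs.length > 4
      · simp only [if_pos hgt]
        have hpne : (((rm.take 4).map (fun m => "1~" ++ PySem.Int.toStr m)).map String.toList) ≠ [] := by
          simp [List.take_eq_nil_iff, hrmne]
        apply String.toList_inj.mp
        simp only [String.toList_append, PySem.Str.toList_join, List.map_append,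
          List.map_cons, List.map_nil]
        rw [chars_join_append_singleton _ _ _ hpne]
        rw [show ", ... 외 ".toList = ", ".toList ++ "... 외 ".toList from rfl]
        simp
      · simp only [if_neg hgt]
        apply String.toList_inj.mp
        simp [String.toList_append]
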